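-- pv_equiv track=rewrite | github.com/wuwangzhang1216/openDB | app/storage/sqlite.py | _build_highlight
-- ===== SOURCE A (Python) =====
-- def _build_highlight(text: str, query: str, context_chars: int = 80) -> str:
--     """Build a highlight snippet from original text by finding query terms."""
--     terms = [t.strip().lower() for t in query.split() if t.strip()]
--     if not terms:
--         return text[:150]
--     text_lower = text.lower()
--     best_pos = -1
--     for term in terms:
--         pos = text_lower.find(term)
--         if pos >= 0 and (best_pos < 0 or pos < best_pos):
--             best_pos = pos
--     if best_pos < 0:
--         return text[:150]
--     start = max(0, best_pos - context_chars)
--     end = min(len(text), best_pos + context_chars)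
--     snippet = text[start:end]
--     if start > 0:
--         snippet = "..." + snippet
--     if end < len(text):
--         snippet = snippet + "..."
--     return snippet
-- ===== SOURCE B (Python) =====
-- def _build_highlight(text: str, query: str, context_chars: int = 80) -> str:
--     """Build a highlight snippet: one left-to-right scan for the earliest term hit."""
--     terms = [t.lower() for t in query.split()]
--     tl = text.lower()
--     pos = next((i for i in range(len(tl)) if any(tl.startswith(t, i) for t in terms)), None)
--     if pos is None:
--         return text[:150]
--     start = max(0, pos - context_chars)
--     end = min(len(text), pos + context_chars)
--     return ("..." if start > 0 else "") + text[start:end] + ("..." if end < len(text) else "")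
-- ===== Notes on version B (the rewrite author's own statement) =====
-- stated objective: alternative
-- what changed: Replaces A's per-term text_lower.find loop that tracks the minimum position with a single left-to-right scan over text positions stopping at the first position where any term matches (next over a generator, returning None), drops A's redundant strip/empty-term filtering and its separate empty-terms early return (the scan naturally finds nothing), and builds the result as one expression with conditional '...' prefix/suffix instead of staged snippet reassignments.
import Mathlib
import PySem

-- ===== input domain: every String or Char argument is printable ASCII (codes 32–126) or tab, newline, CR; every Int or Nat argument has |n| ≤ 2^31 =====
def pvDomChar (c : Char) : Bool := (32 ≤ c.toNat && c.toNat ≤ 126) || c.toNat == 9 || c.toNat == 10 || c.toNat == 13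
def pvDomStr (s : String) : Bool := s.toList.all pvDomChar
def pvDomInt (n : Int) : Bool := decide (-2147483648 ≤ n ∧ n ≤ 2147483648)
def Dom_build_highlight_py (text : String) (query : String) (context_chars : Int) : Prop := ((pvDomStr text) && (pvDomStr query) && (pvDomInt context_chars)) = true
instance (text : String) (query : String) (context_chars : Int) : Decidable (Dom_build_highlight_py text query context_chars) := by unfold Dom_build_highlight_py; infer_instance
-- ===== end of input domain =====

-- B replaces A's per-term find-the-minimum loop by ONE left-to-right scan of the text that stops at
-- the first position where any query term matches; it also folds A's three fallback/ellipsis branches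
-- into a single option match and a one-expression result (alternative traversal, same result).

-- ===== PORT A =====
def build_highlight_py (text : String) (query : String) (context_chars : Int) : String :=
  let terms := ((PySem.Chars.split₀ query.toList).filter
      (fun t => !(PySem.Chars.strip t).isEmpty)).map
      (fun t => PySem.Chars.lower (PySem.Chars.strip t))
  if terms.isEmpty then
    String.ofList (PySem.Chars.slice text.toList none (some 150))
  else
    let text_lower := PySem.Chars.lower text.toList
    let best_pos : Int := terms.foldl (fun best term =>
      let pos := PySem.Chars.find text_lower term
      if 0 ≤ pos ∧ (best < 0 ∨ pos < best) then pos else best) (-1)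
    if best_pos < 0 then
      String.ofList (PySem.Chars.slice text.toList none (some 150))
    else
      let start := max 0 (best_pos - context_chars)
      let stop := min ((text.toList.length : Int)) (best_pos + context_chars)
      let snippet := PySem.Chars.slice text.toList (some start) (some stop)
      let snippet := if 0 < start then "...".toList ++ snippet else snippet
      let snippet := if stop < ((text.toList.length : Int)) then snippet ++ "...".toList else snippet
      String.ofList snippet

-- ===== PORT B =====
-- `next((i for i in range(len(tl)) if any(tl.startswith(t, i) for t in terms)), None)`
def pvFirstHit (terms : List (List Char)) : List Char → Nat → Option Nat
  | [], _ => none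
  | s@(_ :: rest), i =>
      if terms.any (fun t => PySem.Chars.startswith s t) then some i
      else pvFirstHit terms rest (i + 1)

def build_highlight_py_alt (text : String) (query : String) (context_chars : Int) : String :=
  let terms := (PySem.Chars.split₀ query.toList).map (fun t => PySem.Chars.lower t)
  match pvFirstHit terms (PySem.Chars.lower text.toList) 0 with
  | none => String.ofList (PySem.Chars.slice text.toList none (some 150))
  | some pos =>
      let n : Int := text.toList.length
      let start := max 0 ((pos : Int) - context_chars)
      let stop := min n ((pos : Int) + context_chars)
      (if 0 < start then "..." else "")
        ++ String.ofList (PySem.Chars.slice text.toList (some start) (some stop))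
        ++ (if stop < n then "..." else "")

-- ===== PRECONDITION & SPEC =====
def Spec_build_highlight_py (text : String) (query : String) (context_chars : Int) (out : String) : Prop := out = build_highlight_py_alt text query context_chars
instance (text : String) (query : String) (context_chars : Int) (out : String) : Decidable (Spec_build_highlight_py text query context_chars out) := by unfold Spec_build_highlight_py; infer_instance

-- ===== CLAIM (what is proved, stated in full; the proofs are below) =====
def Claim_equal_build_highlight_py : Prop := ∀ (text : String) (query : String) (context_chars : Int), Dom_build_highlight_py text query context_chars → Spec_build_highlight_py text query context_chars (build_highlight_py text query context_chars)

-- ===== LEMMAS AND PROOFS =====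

-- `some term occurs at position j of tl`
def pvOcc (terms : List (List Char)) (tl : List Char) (j : Nat) : Prop :=
  ∃ t ∈ terms, t <+: tl.drop j

-- `r is the first position at which some term occurs, -1 if none occurs anywhere`
def pvFirst (terms : List (List Char)) (tl : List Char) (r : Int) : Prop :=
  (r = -1 ∧ ∀ j, ¬ pvOcc terms tl j) ∨
  (0 ≤ r ∧ pvOcc terms tl r.toNat ∧ ∀ j < r.toNat, ¬ pvOcc terms tl j)

lemma pvFirst_uniq {terms : List (List Char)} {tl : List Char} {r₁ r₂ : Int}
    (h₁ : pvFirst terms tl r₁) (h₂ : pvFirst terms tl r₂) : r₁ = r₂ := by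
  rcases h₁ with ⟨e₁, n₁⟩ | ⟨p₁, o₁, m₁⟩ <;> rcases h₂ with ⟨e₂, n₂⟩ | ⟨p₂, o₂, m₂⟩
  · omega
  · exact absurd o₂ (n₁ _)
  · exact absurd o₁ (n₂ _)
  · rcases Nat.lt_trichotomy r₁.toNat r₂.toNat with h | h | h
    · exact absurd o₁ (m₂ _ h)
    · omega
    · exact absurd o₂ (m₁ _ h)

-- result of a none/some scan, as the Int that A's loop produces
def pvOptInt : Option Nat → Int
  | none => -1
  | some i => (i : Int)

-- B's scan over the suffix tl.drop i returns the first hit at or after i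
lemma pvFirstHit_spec (terms : List (List Char)) (tl : List Char)
    (hne : ∀ t ∈ terms, t ≠ []) :
    ∀ (s : List Char) (i : Nat), s = tl.drop i →
      (pvFirstHit terms s i = none ∧ ∀ j, i ≤ j → ¬ pvOcc terms tl j) ∨
      (∃ r, pvFirstHit terms s i = some r ∧ i ≤ r ∧ pvOcc terms tl r ∧
        ∀ j, i ≤ j → j < r → ¬ pvOcc terms tl j) := by
  intro s
  induction s with
  | nil =>
      intro i hs
      left
      refine ⟨rfl, fun j hj ⟨t, ht, hp⟩ => ?_⟩
      have hlen : tl.length ≤ i := List.drop_eq_nil_iff.mp hs.symm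
      have : tl.drop j = [] := List.drop_eq_nil_iff.mpr (by omega)
      rw [this] at hp
      exact hne t ht (List.prefix_nil.mp hp)
  | cons c rest ih =>
      intro i hs
      by_cases hany : terms.any (fun t => PySem.Chars.startswith (c :: rest) t) = true
      · right
        refine ⟨i, ?_, le_refl _, ?_, fun j h1 h2 => by omega⟩
        · simp [pvFirstHit, hany]
        · rcases List.any_eq_true.mp hany with ⟨t, ht, hp⟩
          exact ⟨t, ht, hs ▸ (PySem.Chars.startswith_iff _ _).mp hp⟩
      · have hrest : rest = tl.drop (i + 1) := by
          have : tl.drop (i + 1) = (tl.drop i).drop 1 := by rw [List.drop_drop]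
          rw [this, ← hs]; rfl
        have hnone : ∀ t ∈ terms, ¬ t <+: tl.drop i := by
          intro t ht hp
          exact hany (List.any_eq_true.mpr ⟨t, ht,
            (PySem.Chars.startswith_iff _ _).mpr (hs ▸ hp)⟩)
        have hstep : pvFirstHit terms (c :: rest) i = pvFirstHit terms rest (i + 1) := by
          simp [pvFirstHit, hany]
        rcases ih (i + 1) hrest with ⟨he, hn⟩ | ⟨r, hr, hle, ho, hm⟩
        · left
          refine ⟨hstep ▸ he, fun j hj hocc => ?_⟩
          rcases Nat.eq_or_lt_of_le hj with rfl | hlt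
          · rcases hocc with ⟨t, ht, hp⟩; exact hnone t ht hp
          · exact hn j hlt hocc
        · right
          refine ⟨r, hstep ▸ hr, by omega, ho, fun j h1 h2 => ?_⟩
          rcases Nat.eq_or_lt_of_le h1 with rfl | hlt
          · rintro ⟨t, ht, hp⟩; exact hnone t ht hp
          · exact hm j hlt h2

lemma pvOcc_append_iff {S : List (List Char)} {t : List Char} {tl : List Char} {j : Nat} :
    pvOcc (S ++ [t]) tl j ↔ pvOcc S tl j ∨ t <+: tl.drop j := by
  simp [pvOcc, or_and_right, exists_or]

-- one step of A's loop preserves the first-occurrence invariant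
lemma pvFold_step {tl : List Char} {S : List (List Char)} {a : Int} (t : List Char)
    (h : pvFirst S tl a) :
    pvFirst (S ++ [t]) tl
      (let pos := PySem.Chars.find tl t;
       if 0 ≤ pos ∧ (a < 0 ∨ pos < a) then pos else a) := by
  set f := PySem.Chars.find tl t with hf
  by_cases hpos : 0 ≤ f
  · have hspec := PySem.Chars.find_spec (s := tl) (sub := t) hpos
    rcases h with ⟨rfl, hn⟩ | ⟨ha, ho, hm⟩
    · simp only [hpos, true_and]
      rw [if_pos (Or.inl (by norm_num))]
      right
      exact ⟨hpos, pvOcc_append_iff.mpr (Or.inr hspec.1),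
        fun j hj => fun hocc => by
          rcases pvOcc_append_iff.mp hocc with h' | h'
          · exact hn j h'
          · exact hspec.2 j hj h'⟩
    · by_cases hlt : f < a
      · rw [if_pos ⟨hpos, Or.inr hlt⟩]
        right
        refine ⟨hpos, pvOcc_append_iff.mpr (Or.inr hspec.1), fun j hj hocc => ?_⟩
        rcases pvOcc_append_iff.mp hocc with h' | h'
        · exact hm j (by omega) h'
        · exact hspec.2 j hj h'
      · rw [if_neg (by omega)]
        right
        refine ⟨ha, pvOcc_append_iff.mpr (Or.inl ho), fun j hj hocc => ?_⟩
        rcases pvOcc_append_iff.mp hocc with h' | h'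
        · exact hm j hj h'
        · exact hspec.2 j (by omega) h'
  · have hneg : f = -1 := by have := PySem.Chars.neg_one_le_find tl t; omega
    have hno : ∀ j, ¬ t <+: tl.drop j := by
      intro j hp
      have hinf : ¬ t <:+: tl := (PySem.Chars.find_eq_neg_one_iff tl t).mp hneg
      have : PySem.Chars.isIn t tl = true :=
        (PySem.Chars.exists_prefix_drop_iff_isIn (s := tl) (sub := t)).mp ⟨j, hp⟩
      exact hinf ((PySem.Chars.isIn_iff_infix t tl).mp this)
    rw [if_neg (by tauto)]
    rcases h with ⟨rfl, hn⟩ | ⟨ha, ho, hm⟩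
    · left
      exact ⟨rfl, fun j hocc => by
        rcases pvOcc_append_iff.mp hocc with h' | h'
        · exact hn j h'
        · exact hno j h'⟩
    · right
      refine ⟨ha, pvOcc_append_iff.mpr (Or.inl ho), fun j hj hocc => ?_⟩
      rcases pvOcc_append_iff.mp hocc with h' | h'
      · exact hm j hj h'
      · exact hno j h'

lemma pvFold_spec (tl : List Char) :
    ∀ (ts S : List (List Char)) (a : Int), pvFirst S tl a →
      pvFirst (S ++ ts) tl
        (ts.foldl (fun best term =>
          let pos := PySem.Chars.find tl term
          if 0 ≤ pos ∧ (best < 0 ∨ pos < best) then pos else best) a) := by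
  intro ts
  induction ts with
  | nil => intro S a h; simpa using h
  | cons t ts ih =>
      intro S a h
      have h' := pvFold_step (tl := tl) t h
      have := ih (S ++ [t]) _ h'
      simpa [List.append_assoc] using this

-- every token of s.split() is nonempty and contains no whitespace
lemma pvGoodAcc :
    ∀ (s : List Char) (cur : List Char) (acc : List (List Char)),
      (∀ c ∈ cur, PySem.Chars.isspace c = false) →
      (∀ t ∈ acc, t ≠ [] ∧ ∀ c ∈ t, PySem.Chars.isspace c = false) →
      ∀ t ∈ PySem.Chars.split₀.go s cur acc, t ≠ [] ∧ ∀ c ∈ t, PySem.Chars.isspace c = false := by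
  intro s
  induction s with
  | nil =>
      intro cur acc hcur hacc t ht
      by_cases hc : cur.isEmpty
      · simp only [PySem.Chars.split₀.go, hc, if_pos, List.mem_reverse] at ht
        exact hacc t ht
      · simp only [PySem.Chars.split₀.go, hc, Bool.false_eq_true, if_false, List.mem_reverse] at ht
        rcases List.mem_cons.mp ht with rfl | h'
        · constructor
          · simp only [ne_eq, List.reverse_eq_nil_iff]
            exact fun h => hc (by simp [h, List.isEmpty_nil])
          · intro c hcmem; exact hcur c (List.mem_reverse.mp hcmem)
        · exact hacc t h'
  | cons c rest ih =>
      intro cur acc hcur hacc t ht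
      by_cases hs : PySem.Chars.isspace c
      · by_cases hc : cur.isEmpty
        · simp only [PySem.Chars.split₀.go, hs, hc, if_pos] at ht
          exact ih [] acc (by simp) hacc t ht
        · simp only [PySem.Chars.split₀.go, hs, hc, if_pos, Bool.false_eq_true, if_false] at ht
          refine ih [] (cur.reverse :: acc) (by simp) ?_ t ht
          intro t' ht'
          rcases List.mem_cons.mp ht' with rfl | h'
          · refine ⟨by simp only [ne_eq, List.reverse_eq_nil_iff]; exact fun h => hc (by simp [h]), ?_⟩
            intro c' hc'; exact hcur c' (List.mem_reverse.mp hc')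
          · exact hacc t' h'
      · simp only [PySem.Chars.split₀.go, hs, Bool.false_eq_true, if_false] at ht
        refine ih (c :: cur) acc ?_ hacc t ht
        intro c' hc'
        rcases List.mem_cons.mp hc' with rfl | h'
        · simpa using hs
        · exact hcur c' h'

lemma pvSplit_tokens (q : List Char) :
    ∀ t ∈ PySem.Chars.split₀ q, t ≠ [] ∧ ∀ c ∈ t, PySem.Chars.isspace c = false := by
  intro t ht
  exact pvGoodAcc q [] [] (by simp) (by simp) t ht

lemma pvStrip_eq {t : List Char} (h : ∀ c ∈ t, PySem.Chars.isspace c = false) :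
    PySem.Chars.strip t = t := by
  have hl : PySem.Chars.lstrip t = t := by
    unfold PySem.Chars.lstrip
    cases t with
    | nil => rfl
    | cons c cs => simp [h c (List.mem_cons_self ..)]
  have hr : PySem.Chars.rstrip t = t := by
    unfold PySem.Chars.rstrip
    cases ht : t.reverse with
    | nil => simp [List.reverse_eq_nil_iff.mp ht]
    | cons c cs =>
        have hc : c ∈ t := List.mem_reverse.mp (ht ▸ List.mem_cons_self ..)
        rw [List.dropWhile_cons]
        simp only [h c hc, Bool.false_eq_true, if_false]
        rw [← ht, List.reverse_reverse]
  unfold PySem.Chars.strip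
  rw [hl, hr]

-- A's term list (strip+filter+lower) equals B's (plain lower of the split)
lemma pvTerms_eq (q : List Char) :
    ((PySem.Chars.split₀ q).filter (fun t => !(PySem.Chars.strip t).isEmpty)).map
      (fun t => PySem.Chars.lower (PySem.Chars.strip t))
    = (PySem.Chars.split₀ q).map (fun t => PySem.Chars.lower t) := by
  rw [List.filter_eq_self.mpr]
  · apply List.map_congr_left
    intro t ht
    rw [pvStrip_eq (pvSplit_tokens q t ht).2]
  · intro t ht
    rw [pvStrip_eq (pvSplit_tokens q t ht).2]
    simp [(pvSplit_tokens q t ht).1]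

lemma pvTermsNe (q : List Char) :
    ∀ t ∈ (PySem.Chars.split₀ q).map (fun t => PySem.Chars.lower t), t ≠ [] := by
  intro t ht
  rcases List.mem_map.mp ht with ⟨t₀, ht₀, rfl⟩
  have := (pvSplit_tokens q t₀ ht₀).1
  simpa [PySem.Chars.lower] using this

-- A's minimum over per-term finds equals B's first scan hit (as an Int)
lemma pvBest_eq (q tl : List Char) :
    ((PySem.Chars.split₀ q).map (fun t => PySem.Chars.lower t)).foldl (fun best term =>
        let pos := PySem.Chars.find tl term
        if 0 ≤ pos ∧ (best < 0 ∨ pos < best) then pos else best) (-1)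
    = pvOptInt (pvFirstHit ((PySem.Chars.split₀ q).map (fun t => PySem.Chars.lower t)) tl 0) := by
  set terms := (PySem.Chars.split₀ q).map (fun t => PySem.Chars.lower t) with hterms
  have hA : pvFirst terms tl (terms.foldl (fun best term =>
      let pos := PySem.Chars.find tl term
      if 0 ≤ pos ∧ (best < 0 ∨ pos < best) then pos else best) (-1)) := by
    have := pvFold_spec tl terms [] (-1) (Or.inl ⟨rfl, by simp [pvOcc]⟩)
    simpa using this
  have hB : pvFirst terms tl (pvOptInt (pvFirstHit terms tl 0)) := by
    rcases pvFirstHit_spec terms tl (pvTermsNe q) tl 0 (by simp) with ⟨he, hn⟩ | ⟨r, hr, _, ho, hm⟩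
    · exact Or.inl ⟨by simp [he, pvOptInt], fun j => hn j (Nat.zero_le j)⟩
    · refine Or.inr ⟨by simp [hr, pvOptInt], by simpa [hr, pvOptInt] using ho, ?_⟩
      intro j hj
      exact hm j (Nat.zero_le j) (by simpa [hr, pvOptInt] using hj)
  exact pvFirst_uniq hA hB

-- ===== VERDICT (by name: the statement is the Claim_ definition above) =====
theorem build_highlight_py_spec : Claim_equal_build_highlight_py := by
  intro text query context_chars _
  unfold Spec_build_highlight_py
  unfold build_highlight_py build_highlight_py_alt
  simp only [pvTerms_eq, pvBest_eq]
  set terms := (PySem.Chars.split₀ query.toList).map (fun t => PySem.Chars.lower t) with hterms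
  set tl := PySem.Chars.lower text.toList with htl
  by_cases hemp : terms.isEmpty
  · have : terms = [] := List.isEmpty_iff.mp hemp
    have hnone : pvFirstHit terms tl 0 = none := by
      rcases pvFirstHit_spec terms tl (this ▸ by simp) tl 0 rfl with ⟨he, _⟩ | ⟨r, hr, _, ho, _⟩
      · exact he
      · rcases ho with ⟨t, ht, _⟩; rw [this] at ht; cases ht
    simp [hemp, hnone]
  · simp only [hemp, if_false, Bool.false_eq_true]
    cases hfh : pvFirstHit terms tl 0 with
    | none => simp [pvOptInt]
    | some p =>
        simp only [pvOptInt]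
        rw [if_neg (by omega)]
        split_ifs <;> (apply String.toList_injective; simp)
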